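-- pv_equiv track=rewrite | github.com/shadrach16/secure-fin-etl | file_ingestor_engine/datahelper.py | groupRecordInSelected
-- ===== SOURCE A (Python) =====
-- def groupRecordInSelected(data=[], property=""):
-- 	branchObj = {}
-- 	for eachData in data:
-- 		objKey = f'{eachData[property]}'
-- 		if (branchObj.get(objKey)):
-- 			branchObj[objKey].append(eachData)
-- 		else:
-- 			branchObj[objKey] = [eachData]
--
-- 	return branchObj
-- ===== SOURCE B (Python) =====
-- def groupRecordInSelected(data=[], property=""):
-- 	# Two-pass grouping: first collect the distinct keys in first-seen order,
-- 	# then build each group with one filter pass per key.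
-- 	keys = list(dict.fromkeys(f'{d[property]}' for d in data))
-- 	return {k: [d for d in data if f'{d[property]}' == k] for k in keys}
-- ===== Notes on version B (the rewrite author's own statement) =====
-- stated objective: alternative
-- what changed: A builds the groups in one incremental pass, appending each record into a dict entry; B instead first dedups the key sequence (dict.fromkeys) and then builds each group by a separate filter pass over the data, one per distinct key.
import Mathlib
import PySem

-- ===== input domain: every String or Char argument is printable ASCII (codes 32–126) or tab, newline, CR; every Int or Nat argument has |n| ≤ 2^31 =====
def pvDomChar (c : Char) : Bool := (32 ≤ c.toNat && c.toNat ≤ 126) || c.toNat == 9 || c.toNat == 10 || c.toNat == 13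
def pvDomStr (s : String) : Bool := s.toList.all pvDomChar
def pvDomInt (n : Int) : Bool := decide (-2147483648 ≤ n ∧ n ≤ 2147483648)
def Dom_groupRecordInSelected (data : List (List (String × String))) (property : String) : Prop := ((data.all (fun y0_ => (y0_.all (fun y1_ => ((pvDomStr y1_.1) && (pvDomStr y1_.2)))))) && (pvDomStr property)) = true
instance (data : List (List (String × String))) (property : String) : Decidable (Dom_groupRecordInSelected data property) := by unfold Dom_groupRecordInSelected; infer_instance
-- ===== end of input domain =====

-- B groups by two passes (ordered key dedup, then one filter per distinct key) instead of
-- A's single incremental dict-insertion pass; alternative decomposition, not faster.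

-- shared key helper: f'{eachData[property]}' — the value is already a str, so the f-string is
-- the dict lookup itself; getD with "" is exact under Pre_ (the key is present, so no KeyError)
def pvKey (record : List (String × String)) (property : String) : String :=
  (PySem.Dict.ofList record).getD property ""

-- ===== PORT A =====
def groupRecordInSelected (data : List (List (String × String))) (property : String) : List (String × List (List (String × String))) :=
  (data.foldl (fun branchObj eachData =>
      let objKey := pvKey eachData property
      let cur := branchObj.getD objKey []   -- branchObj.get(objKey); truthy iff present and nonempty
      if cur.isEmpty then branchObj.insert objKey [eachData]
      else branchObj.insert objKey (cur ++ [eachData]))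
    PySem.Dict.empty).items

-- ===== PORT B =====
def groupRecordInSelected_alt (data : List (List (String × String))) (property : String) : List (String × List (List (String × String))) :=
  let keys := PySem.List.dedup (data.map (fun d => pvKey d property))  -- dict.fromkeys ordered dedup
  keys.map (fun k => (k, data.filter (fun d => pvKey d property == k)))

-- ===== PRECONDITION & SPEC =====
-- Pre_ excludes exactly the records missing the property key, on which A raises KeyError.
def Pre_groupRecordInSelected (data : List (List (String × String))) (property : String) : Prop :=
  (data.all (fun r => r.any (fun p => p.1 == property))) = true
instance (data : List (List (String × String))) (property : String) : Decidable (Pre_groupRecordInSelected data property) := by unfold Pre_groupRecordInSelected; infer_instance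
def pvWitness_groupRecordInSelected : (List (List (String × String))) × String :=
  ([[("k", "a")], [("k", "b"), ("x", "c")], [("k", "a")]], "k")

def Spec_groupRecordInSelected (data : List (List (String × String))) (property : String) (out : List (String × List (List (String × String)))) : Prop := out = groupRecordInSelected_alt data property
instance (data : List (List (String × String))) (property : String) (out : List (String × List (List (String × String)))) : Decidable (Spec_groupRecordInSelected data property out) := by unfold Spec_groupRecordInSelected; infer_instance

-- ===== CLAIM (what is proved, stated in full; the proofs are below) =====
def Claim_equal_groupRecordInSelected : Prop := ∀ (data : List (List (String × String))) (property : String), Dom_groupRecordInSelected data property → Pre_groupRecordInSelected data property → Spec_groupRecordInSelected data property (groupRecordInSelected data property)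

-- ===== LEMMAS AND PROOFS =====

-- A's loop body, after splitting on the truthiness check, IS the modify step
lemma stepA_eq_modify (property : String) :
    (fun (branchObj : PySem.Dict String (List (List (String × String)))) eachData =>
      let objKey := pvKey eachData property
      let cur := branchObj.getD objKey []
      if cur.isEmpty then branchObj.insert objKey [eachData]
      else branchObj.insert objKey (cur ++ [eachData]))
    = (fun branchObj eachData =>
        branchObj.modify (pvKey eachData property) [] (· ++ [eachData])) := by
  funext d ed
  simp only [PySem.Dict.modify]
  split <;> rename_i h
  · simp_all [List.isEmpty_iff]
  · rfl

lemma groupRecordInSelected_eq_alt (data : List (List (String × String))) (property : String) :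
    groupRecordInSelected data property = groupRecordInSelected_alt data property := by
  unfold groupRecordInSelected groupRecordInSelected_alt
  rw [stepA_eq_modify]
  set key := fun d => pvKey d property with hkey
  set F := data.foldl (fun branchObj eachData =>
      branchObj.modify (key eachData) [] (· ++ [eachData])) PySem.Dict.empty with hF
  have hnd : F.keys.Nodup := by
    rw [hF]
    exact PySem.Dict.nodup_keys_foldl_modify_key data key [] (fun d ed => (· ++ [ed])) _
      PySem.Dict.nodup_keys_empty
  have hkeys : F.keys = PySem.List.dedup (data.map key) := by
    rw [hF, PySem.Dict.keys_foldl_modify_key]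
    simp only [PySem.Dict.keys_empty, PySem.Set.update, PySem.List.dedup_eq_ofList,
      PySem.Set.ofList, PySem.Set.empty]
  have hget : ∀ c, F.getD c [] = data.filter (fun d => key d == c) := by
    intro c
    have hm : F = (data.map (fun ed => (key ed, ed))).foldl
        (fun d p => d.modify p.1 [] (· ++ [p.2])) PySem.Dict.empty := by
      rw [hF, List.foldl_map]
    rw [hm, PySem.Dict.getD_foldl_modify_append]
    simp [List.filter_map, Function.comp_def]
  rw [PySem.Dict.items_eq_map_keys F hnd [], hkeys]
  exact List.map_congr_left (fun k _ => by rw [hget k])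

-- ===== VERDICT (by name: the statement is the Claim_ definition above) =====
theorem groupRecordInSelected_spec : Claim_equal_groupRecordInSelected := by
  intro data property _ _
  unfold Spec_groupRecordInSelected
  exact groupRecordInSelected_eq_alt data property
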